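-- pv_equiv track=rewrite | github.com/alex-stoneman/SchoolFolder | Computing/Homework/CSHw/Homeworks/Homework10.py | num_to_str
-- ===== SOURCE A (Python) =====
-- def num_to_str(val):
--     num = ""
--     for x in range(1, 7):
--         try:
--             num += (val[-x])
--         except IndexError:
--             num += "0"
--     return num[::-1]
-- ===== SOURCE B (Python) =====
-- def num_to_str(val):
--     tail = val[-6:]
--     return "0" * (6 - len(tail)) + tail
-- ===== Notes on version B (the rewrite author's own statement) =====
-- stated objective: simpler
-- what changed: replaced the six-iteration try/except indexing loop plus final [::-1] reversal with a single negative slice val[-6:] and a computed zero-pad prefix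
import Mathlib
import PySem

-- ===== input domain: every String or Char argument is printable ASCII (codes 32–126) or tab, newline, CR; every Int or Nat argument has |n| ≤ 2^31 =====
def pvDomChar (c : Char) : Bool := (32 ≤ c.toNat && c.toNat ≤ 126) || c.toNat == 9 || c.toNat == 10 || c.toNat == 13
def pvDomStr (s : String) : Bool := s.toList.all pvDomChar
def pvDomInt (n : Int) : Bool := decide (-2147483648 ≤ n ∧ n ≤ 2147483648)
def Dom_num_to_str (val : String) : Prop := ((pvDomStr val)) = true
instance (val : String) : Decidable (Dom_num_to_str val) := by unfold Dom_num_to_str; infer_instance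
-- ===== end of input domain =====

-- B replaces A's six-iteration try/except loop and final [::-1] reversal with one
-- negative slice and a computed zero-pad prefix (objective: simpler).

-- ===== PORT A =====
def num_to_str (val : String) : String :=
  -- num = ""; for x in range(1, 7): try: num += val[-x] except IndexError: num += "0"
  -- (indexing done on the code-point list side, hoisting val.toList once)
  let l := val.toList
  let num := (PySem.List.pyRange 1 7 1).foldl
    (fun num x =>
      match PySem.List.pyGet? l (-x) with
      | some c => num ++ [c]
      | none   => num ++ ['0'])
    ([] : List Char)
  -- return num[::-1]
  String.ofList num.reverse

-- ===== PORT B =====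
def num_to_str_alt (val : String) : String :=
  -- tail = val[-6:]
  let tail := PySem.List.slice val.toList (some (-6)) none
  -- return "0" * (6 - len(tail)) + tail
  String.ofList (List.replicate (6 - tail.length) '0' ++ tail)

-- ===== PRECONDITION & SPEC =====
def Spec_num_to_str (val : String) (out : String) : Prop := out = num_to_str_alt val
instance (val : String) (out : String) : Decidable (Spec_num_to_str val out) := by unfold Spec_num_to_str; infer_instance

-- ===== CLAIM (what is proved, stated in full; the proofs are below) =====
def Claim_equal_num_to_str : Prop := ∀ (val : String), Dom_num_to_str val → Spec_num_to_str val (num_to_str val)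

-- ===== LEMMAS AND PROOFS =====

-- A's loop body, on the list side
def pvA (l : List Char) : List Char :=
  ((PySem.List.pyRange 1 7 1).foldl
    (fun num x =>
      match PySem.List.pyGet? l (-x) with
      | some c => num ++ [c]
      | none   => num ++ ['0'])
    ([] : List Char)).reverse

-- B's result, on the list side
def pvB (l : List Char) : List Char :=
  List.replicate (6 - (l.drop (l.length - 6)).length) '0' ++ l.drop (l.length - 6)

lemma pvA_cons (a : Char) (m : List Char) (h : 6 ≤ m.length) : pvA (a :: m) = pvA m := by
  have hk : ∀ k : Nat, 0 < k → k ≤ 6 →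
      PySem.List.pyGet? (a :: m) (-(k : Int)) = PySem.List.pyGet? m (-(k : Int)) := by
    intro k hk1 hk2
    rw [PySem.List.pyGet?_neg_natCast (xs := a :: m) (k := k) hk1 (by simp; omega),
        PySem.List.pyGet?_neg_natCast (xs := m) (k := k) hk1 (by omega)]
    have h1 : (a :: m).length - k = (m.length - k) + 1 := by simp; omega
    rw [h1, List.getElem?_cons_succ]
  have hr : PySem.List.pyRange 1 7 1 = [1, 2, 3, 4, 5, 6] := by decide
  unfold pvA
  rw [hr]
  simp only [List.foldl]
  rw [show (-1 : Int) = -((1:Nat):Int) by norm_num, hk 1 (by norm_num) (by norm_num)]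
  rw [show (-2 : Int) = -((2:Nat):Int) by norm_num, hk 2 (by norm_num) (by norm_num)]
  rw [show (-3 : Int) = -((3:Nat):Int) by norm_num, hk 3 (by norm_num) (by norm_num)]
  rw [show (-4 : Int) = -((4:Nat):Int) by norm_num, hk 4 (by norm_num) (by norm_num)]
  rw [show (-5 : Int) = -((5:Nat):Int) by norm_num, hk 5 (by norm_num) (by norm_num)]
  rw [show (-6 : Int) = -((6:Nat):Int) by norm_num, hk 6 (by norm_num) (by norm_num)]

lemma pvB_cons (a : Char) (m : List Char) (h : 6 ≤ m.length) : pvB (a :: m) = pvB m := by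
  have h1 : (a :: m).length - 6 = (m.length - 6) + 1 := by simp; omega
  unfold pvB
  rw [h1, List.drop_succ_cons]

lemma pv_key (l : List Char) : pvA l = pvB l := by
  induction l with
  | nil => rfl
  | cons a m ih =>
    by_cases h : 6 ≤ m.length
    · rw [pvA_cons a m h, pvB_cons a m h, ih]
    · rcases m with _ | ⟨b, _ | ⟨c, _ | ⟨d, _ | ⟨e, _ | ⟨f, _ | ⟨g, rest⟩⟩⟩⟩⟩⟩
      · rfl
      · rfl
      · rfl
      · rfl
      · rfl
      · rfl
      · exfalso; apply h; simp

-- ===== VERDICT (by name: the statement is the Claim_ definition above) =====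
theorem num_to_str_spec : Claim_equal_num_to_str := by
  intro val _
  unfold Spec_num_to_str num_to_str num_to_str_alt
  have h := pv_key val.toList
  unfold pvA pvB at h
  simp only [PySem.List.slice_from_neg_ofNat val.toList 6 (by norm_num), h]
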